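-- pv_equiv track=rewrite | github.com/IBM-Security/directory | server/tools/replication/manage_topology.py | get_agreementsubentry_dn
-- ===== SOURCE A (Python) =====
-- def get_agreementsubentry_dn(newListContext, replobject):
--     newreplobject = []
--     finalreplobject = []
--
--     for ro in replobject:
--         for o in ro:
--             for key, value in o.items():
--                 if (key == "dn"):
--                     newreplobject.append(dict([(value, ro)]))
--
--     for context in newListContext:
--         currentContext = context.strip().lower()
--         for ro in newreplobject:
--             for replContext, replob in ro.items():
--                 if (currentContext in replContext.strip().lower()):
--                     finalreplobject.append(dict([(currentContext, replob)]))
--     return finalreplobject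
-- ===== SOURCE B (Python) =====
-- def get_agreementsubentry_dn(newListContext, replobject):
--     ccs = [context.strip().lower() for context in newListContext]
--     buckets = [[] for _ in ccs]
--     for ro in replobject:
--         for o in ro:
--             for key, value in o.items():
--                 if key == "dn":
--                     dn = value.strip().lower()
--                     for bucket, cc in zip(buckets, ccs):
--                         if cc in dn:
--                             bucket.append({cc: ro})
--     out = []
--     for bucket in buckets:
--         out += bucket
--     return out
-- ===== Notes on version B (the rewrite author's own statement) =====
-- stated objective: alternative
-- what changed: B inverts the loop nesting: instead of A's index of singleton {dn: ro} dicts scanned once per context, B walks the replobject structure exactly once, normalises each dn a single time, and distributes each matching dn into per-context buckets which are concatenated at the end, so the data structure (buckets grouped by context) and the traversal order (pair-major instead of context-major) both change while the output order is preserved.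
import Mathlib
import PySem

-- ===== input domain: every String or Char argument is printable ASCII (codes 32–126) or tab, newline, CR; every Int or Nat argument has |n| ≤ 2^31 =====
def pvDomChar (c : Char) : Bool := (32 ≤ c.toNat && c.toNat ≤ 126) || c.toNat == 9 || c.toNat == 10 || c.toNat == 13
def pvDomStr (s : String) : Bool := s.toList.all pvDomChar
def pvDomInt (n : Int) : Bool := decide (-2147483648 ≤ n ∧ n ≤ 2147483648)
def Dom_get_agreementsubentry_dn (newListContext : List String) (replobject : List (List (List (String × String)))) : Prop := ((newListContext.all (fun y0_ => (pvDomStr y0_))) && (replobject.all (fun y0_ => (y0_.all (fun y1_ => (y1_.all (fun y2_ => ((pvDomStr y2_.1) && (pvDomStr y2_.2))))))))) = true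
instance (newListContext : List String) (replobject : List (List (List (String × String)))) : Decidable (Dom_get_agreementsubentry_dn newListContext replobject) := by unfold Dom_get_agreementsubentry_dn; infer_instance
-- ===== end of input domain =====

-- B inverts the loop nesting: one walk of replobject distributing each dn into per-context buckets, concatenated at the end; same output order (objective: alternative).

-- ===== PORT A =====
def get_agreementsubentry_dn (newListContext : List String) (replobject : List (List (List (String × String)))) : List (List (String × List (List (String × String)))) :=
  let newreplobject : List (List (String × List (List (String × String)))) :=
    replobject.foldl (fun acc ro =>
      ro.foldl (fun acc o =>
        o.foldl (fun acc kv =>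
          if kv.1 == "dn" then acc ++ [[(kv.2, ro)]] else acc) acc) acc) []
  newListContext.foldl (fun acc context =>
    let currentContext := PySem.Str.lower (PySem.Str.strip context)
    newreplobject.foldl (fun acc ro =>
      ro.foldl (fun acc p =>
        if PySem.Str.isIn currentContext (PySem.Str.lower (PySem.Str.strip p.1)) then
          acc ++ [[(currentContext, p.2)]] else acc) acc) acc) []

-- ===== PORT B =====
-- the zip(buckets, ccs) loop mutating each bucket in place is ported as List.zipWith over the bucket list (exact: same pairing, same per-bucket update)
def get_agreementsubentry_dn_alt (newListContext : List String) (replobject : List (List (List (String × String)))) : List (List (String × List (List (String × String)))) :=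
  let ccs : List String := newListContext.map (fun context => PySem.Str.lower (PySem.Str.strip context))
  let buckets : List (List (List (String × List (List (String × String))))) :=
    replobject.foldl (fun bks ro =>
      ro.foldl (fun bks o =>
        o.foldl (fun bks kv =>
          if kv.1 == "dn" then
            let dn := PySem.Str.lower (PySem.Str.strip kv.2)
            List.zipWith (fun bucket cc =>
              if PySem.Str.isIn cc dn then bucket ++ [[(cc, ro)]] else bucket) bks ccs
          else bks) bks) bks) (ccs.map (fun _ => []))
  buckets.foldl (fun out bucket => out ++ bucket) []

-- ===== PRECONDITION & SPEC =====
def Spec_get_agreementsubentry_dn (newListContext : List String) (replobject : List (List (List (String × String)))) (out : List (List (String × List (List (String × String))))) : Prop := out = get_agreementsubentry_dn_alt newListContext replobject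
instance (newListContext : List String) (replobject : List (List (List (String × String)))) (out : List (List (String × List (List (String × String))))) : Decidable (Spec_get_agreementsubentry_dn newListContext replobject out) := by unfold Spec_get_agreementsubentry_dn; infer_instance

-- ===== CLAIM =====
def Claim_equal_get_agreementsubentry_dn : Prop := ∀ (newListContext : List String) (replobject : List (List (List (String × String)))), Dom_get_agreementsubentry_dn newListContext replobject → Spec_get_agreementsubentry_dn newListContext replobject (get_agreementsubentry_dn newListContext replobject)

-- ===== LEMMAS AND PROOFS =====

-- The flat list of (dn-value, ro) pairs the structure walk visits, in traversal order.
def pvPairs (replobject : List (List (List (String × String)))) : List (String × List (List (String × String))) :=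
  replobject.flatMap (fun ro => ro.flatMap (fun o =>
    (o.filter (fun kv => kv.1 == "dn")).map (fun kv => (kv.2, ro))))

-- the matches a fixed normalised context cc collects over a pair list, in pair order
def pvMatches (cc : String) (ps : List (String × List (List (String × String)))) : List (List (String × List (List (String × String)))) :=
  (ps.filter (fun p => PySem.Str.isIn cc (PySem.Str.lower (PySem.Str.strip p.1)))).map
    (fun p => [(cc, p.2)])

-- pvMatches on a cons
theorem pvMatches_cons (cc : String) (m : String × List (List (String × String)))
    (rest : List (String × List (List (String × String)))) :
    pvMatches cc (m :: rest)
    = (if PySem.Str.isIn cc (PySem.Str.lower (PySem.Str.strip m.1)) then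
        [[(cc, m.2)]] else []) ++ pvMatches cc rest := by
  simp only [pvMatches, List.filter_cons]
  by_cases h : PySem.Str.isIn cc (PySem.Str.lower (PySem.Str.strip m.1)) = true
  · rw [if_pos h, if_pos h, List.map_cons, List.singleton_append]
  · rw [if_neg h, if_neg h, List.nil_append]

-- the triple structure walk acting only on "dn" items is the fold of g over pvPairs
theorem pvStructO {σ : Type} (g : σ → (String × List (List (String × String))) → σ)
    (rv : List (List (String × String))) (o : List (String × String)) (st : σ) :
    o.foldl (fun st kv => if kv.1 == "dn" then g st (kv.2, rv) else st) st
    = ((o.filter (fun kv => kv.1 == "dn")).map (fun kv => (kv.2, rv))).foldl g st := by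
  induction o generalizing st with
  | nil => rfl
  | cons kv o' ih =>
    rw [List.foldl_cons, List.filter_cons]
    by_cases h : (kv.1 == "dn") = true
    · rw [if_pos h, if_pos h, List.map_cons, List.foldl_cons, ih]
    · rw [if_neg h, if_neg h, ih]

theorem pvStructRo {σ : Type} (g : σ → (String × List (List (String × String))) → σ)
    (rv : List (List (String × String))) (os : List (List (String × String))) (st : σ) :
    os.foldl (fun st o =>
      o.foldl (fun st kv => if kv.1 == "dn" then g st (kv.2, rv) else st) st) st
    = (os.flatMap (fun o => (o.filter (fun kv => kv.1 == "dn")).map (fun kv => (kv.2, rv)))).foldl g st := by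
  induction os generalizing st with
  | nil => rfl
  | cons o os' ih =>
    rw [List.foldl_cons, List.flatMap_cons, List.foldl_append, pvStructO, ih]

theorem pvStruct {σ : Type} (g : σ → (String × List (List (String × String))) → σ)
    (replobject : List (List (List (String × String)))) (st : σ) :
    replobject.foldl (fun st ro =>
      ro.foldl (fun st o =>
        o.foldl (fun st kv =>
          if kv.1 == "dn" then g st (kv.2, ro) else st) st) st) st
    = (pvPairs replobject).foldl g st := by
  induction replobject generalizing st with
  | nil => rfl
  | cons ro rest ih =>
    rw [List.foldl_cons, pvPairs, List.flatMap_cons, List.foldl_append, pvStructRo g ro ro, ih]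
    rfl

-- A's second phase for a fixed cc over the singleton dicts appends pvMatches
theorem pvFold (cc : String) (ms : List (String × List (List (String × String))))
    (acc : List (List (String × List (List (String × String))))) :
    (ms.map (fun p => [p])).foldl (fun acc ro =>
      ro.foldl (fun acc p =>
        if PySem.Str.isIn cc (PySem.Str.lower (PySem.Str.strip p.1)) then
          acc ++ [[(cc, p.2)]] else acc) acc) acc
    = acc ++ pvMatches cc ms := by
  induction ms generalizing acc with
  | nil => simp [pvMatches]
  | cons m rest ih =>
    rw [List.map_cons, List.foldl_cons, List.foldl_cons, List.foldl_nil, ih, pvMatches_cons]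
    by_cases h : PySem.Str.isIn cc (PySem.Str.lower (PySem.Str.strip m.1)) = true
    · rw [if_pos h, if_pos h, List.append_assoc]
    · rw [if_neg h, if_neg h, List.nil_append]

-- A's outer context loop collects pvMatches context by context
theorem pvOuterA (cs : List String) (ms : List (String × List (List (String × String))))
    (acc : List (List (String × List (List (String × String))))) :
    cs.foldl (fun acc context =>
      ((ms.map (fun p => [p])).foldl (fun acc ro =>
        ro.foldl (fun acc p =>
          if PySem.Str.isIn (PySem.Str.lower (PySem.Str.strip context)) (PySem.Str.lower (PySem.Str.strip p.1)) then
            acc ++ [[(PySem.Str.lower (PySem.Str.strip context), p.2)]] else acc) acc) acc)) acc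
    = acc ++ cs.flatMap (fun context => pvMatches (PySem.Str.lower (PySem.Str.strip context)) ms) := by
  induction cs generalizing acc with
  | nil => simp
  | cons c rest ih =>
    rw [List.foldl_cons, List.flatMap_cons, pvFold, ih, List.append_assoc]

-- B's pair fold keeps each bucket equal to its context's pvMatches so far
theorem pvBuckets (ccs : List String) (ps : List (String × List (List (String × String))))
    (h : String → List (List (String × List (List (String × String))))) :
    ps.foldl (fun bks p =>
      List.zipWith (fun bucket cc =>
        if PySem.Str.isIn cc (PySem.Str.lower (PySem.Str.strip p.1)) then
          bucket ++ [[(cc, p.2)]] else bucket) bks ccs) (ccs.map h)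
    = ccs.map (fun cc => h cc ++ pvMatches cc ps) := by
  induction ps generalizing h with
  | nil => simp [pvMatches]
  | cons p ps' ih =>
    rw [List.foldl_cons, List.zipWith_map_left, List.zipWith_self]
    have step :
        (ccs.map (fun cc => if PySem.Str.isIn cc (PySem.Str.lower (PySem.Str.strip p.1)) then
            h cc ++ [[(cc, p.2)]] else h cc))
        = ccs.map (fun cc => h cc ++ (if PySem.Str.isIn cc (PySem.Str.lower (PySem.Str.strip p.1)) then
            [[(cc, p.2)]] else [])) := by
      refine List.map_congr_left ?_
      intro cc _
      by_cases hc : PySem.Str.isIn cc (PySem.Str.lower (PySem.Str.strip p.1)) = true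
      · rw [if_pos hc, if_pos hc]
      · rw [if_neg hc, if_neg hc, List.append_nil]
    rw [step, ih]
    refine List.map_congr_left ?_
    intro cc _
    rw [List.append_assoc, pvMatches_cons]

-- the final concatenation loop flattens the bucket list
theorem pvConcat {α : Type} (ls : List (List α)) (acc : List α) :
    ls.foldl (fun out bucket => out ++ bucket) acc = acc ++ ls.flatten := by
  induction ls generalizing acc with
  | nil => simp
  | cons l ls' ih =>
    rw [List.foldl_cons, ih, List.flatten_cons, List.append_assoc]

-- ===== VERDICT =====
theorem get_agreementsubentry_dn_spec : Claim_equal_get_agreementsubentry_dn := by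
  intro newListContext replobject _
  show get_agreementsubentry_dn newListContext replobject = get_agreementsubentry_dn_alt newListContext replobject
  simp only [get_agreementsubentry_dn, get_agreementsubentry_dn_alt]
  rw [pvStruct (fun acc p => acc ++ [[p]]) replobject []]
  rw [pvStruct (fun bks p =>
        List.zipWith (fun bucket cc =>
          if PySem.Str.isIn cc (PySem.Str.lower (PySem.Str.strip p.1)) then
            bucket ++ [[(cc, p.2)]] else bucket) bks
        (newListContext.map (fun context => PySem.Str.lower (PySem.Str.strip context)))) replobject _]
  have hA :
      (pvPairs replobject).foldl (fun acc p => acc ++ [[p]]) ([] : List (List (String × List (List (String × String)))))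
      = (pvPairs replobject).map (fun p => [p]) := by
    have : ∀ (ps : List (String × List (List (String × String))))
        (acc : List (List (String × List (List (String × String))))),
        ps.foldl (fun acc p => acc ++ [[p]]) acc = acc ++ ps.map (fun p => [p]) := by
      intro ps
      induction ps with
      | nil => simp
      | cons q qs ih => intro acc; rw [List.foldl_cons, ih, List.map_cons, List.append_assoc]; rfl
    rw [this, List.nil_append]
  rw [hA, pvOuterA, List.nil_append]
  have hB := pvBuckets
    (newListContext.map (fun context => PySem.Str.lower (PySem.Str.strip context)))
    (pvPairs replobject) (fun _ => [])
  rw [hB, pvConcat, List.nil_append]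
  simp only [List.nil_append, List.map_map, ← List.flatMap_def, Function.comp_def]
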